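-- pv_equiv track=rewrite | github.com/justinlietz93/neuroca | integration/adapters/anthropic.py | _is_valid_model
-- ===== SOURCE A (Python) =====
-- from enum import Enum
--
-- class AnthropicModelFamily(str, Enum):
--     """Enumeration of supported Anthropic model families."""
--     CLAUDE = "claude"
--     CLAUDE_INSTANT = "claude-instant"
--     CLAUDE_2 = "claude-2"
--     CLAUDE_3 = "claude-3"
--
-- def _is_valid_model(model: str) -> bool:
--     """
--     Check if the provided model is valid for Anthropic.
--
--     Args:
--         model: Model name to validate
--
--     Returns:
--         bool: True if model is valid, False otherwise
--     """
--     # List of supported models - update as Anthropic releases new models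
--     supported_models = [
--         # Claude 3 family
--         "claude-3-opus-20240229",
--         "claude-3-sonnet-20240229",
--         "claude-3-haiku-20240307",
--         # Claude 2 family
--         "claude-2",
--         "claude-2.0",
--         "claude-2.1",
--         # Claude Instant family
--         "claude-instant-1",
--         "claude-instant-1.2",
--         # Legacy Claude models
--         "claude-1",
--         "claude-1.3",
--         "claude-1.2",
--         "claude-1.0",
--     ]
--
--     # Check if the model is in the supported list
--     if model in supported_models:
--         return True
--
--     # Check if the model starts with a supported family prefix
--     for family in AnthropicModelFamily:
--         if model.startswith(family.value):
--             return True
--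
--     return False
-- ===== SOURCE B (Python) =====
-- def _is_valid_model(model: str) -> bool:
--     """Every supported model and every family prefix begins with "claude",
--     and "claude" itself is a family prefix, so validation is one prefix test."""
--     return model.startswith("claude")
-- ===== Notes on version B (the rewrite author's own statement) =====
-- stated objective: simpler
-- what changed: Replaced the 12-element membership scan plus the enum-prefix loop by a single closed-form prefix test model.startswith("claude"), exact because every listed model and family prefix begins with "claude" and "claude" itself is a family prefix.
import Mathlib
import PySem

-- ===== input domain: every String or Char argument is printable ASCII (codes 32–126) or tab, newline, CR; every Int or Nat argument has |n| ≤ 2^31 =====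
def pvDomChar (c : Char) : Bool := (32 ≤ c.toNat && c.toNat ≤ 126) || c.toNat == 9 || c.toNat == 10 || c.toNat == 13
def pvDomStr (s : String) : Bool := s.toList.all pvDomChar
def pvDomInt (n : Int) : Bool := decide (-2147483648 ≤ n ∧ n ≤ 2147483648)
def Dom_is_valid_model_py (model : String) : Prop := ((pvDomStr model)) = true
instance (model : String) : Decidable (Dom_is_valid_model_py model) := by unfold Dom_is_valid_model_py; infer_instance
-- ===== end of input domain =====

-- B replaces A's supported-model list scan and enum-prefix loop by the single
-- prefix test startswith "claude" (simpler; exact, since every entry starts with "claude").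

-- ===== PORT A =====
def pvSupportedModels : List String :=
  [ "claude-3-opus-20240229", "claude-3-sonnet-20240229", "claude-3-haiku-20240307",
    "claude-2", "claude-2.0", "claude-2.1",
    "claude-instant-1", "claude-instant-1.2",
    "claude-1", "claude-1.3", "claude-1.2", "claude-1.0" ]

def pvFamilies : List String := ["claude", "claude-instant", "claude-2", "claude-3"]

def is_valid_model_py (model : String) : Bool :=
  if pvSupportedModels.contains model then true
  else if pvFamilies.any (fun f => PySem.Str.startswith model f) then true
  else false

-- ===== PORT B =====
def is_valid_model_py_alt (model : String) : Bool :=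
  PySem.Str.startswith model "claude"

-- ===== PRECONDITION & SPEC =====
def Spec_is_valid_model_py (model : String) (out : Bool) : Prop := out = is_valid_model_py_alt model
instance (model : String) (out : Bool) : Decidable (Spec_is_valid_model_py model out) := by unfold Spec_is_valid_model_py; infer_instance

-- ===== CLAIM (what is proved, stated in full; the proofs are below) =====
def Claim_equal_is_valid_model_py : Prop := ∀ (model : String), Dom_is_valid_model_py model → Spec_is_valid_model_py model (is_valid_model_py model)

-- ===== LEMMAS AND PROOFS =====

-- every supported model starts with "claude"
theorem pvSupported_starts (model : String) (h : pvSupportedModels.contains model = true) :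
    PySem.Str.startswith model "claude" = true := by
  simp [pvSupportedModels, List.contains_eq_mem] at h
  rcases h with h|h|h|h|h|h|h|h|h|h|h|h <;> subst h <;> decide

-- every family prefix starts with "claude", and "claude" is itself a family
theorem pv_prefix_trans (f model : String)
    (hf : ("claude".toList <+: f.toList))
    (h : PySem.Str.startswith model f = true) :
    PySem.Str.startswith model "claude" = true := by
  simp only [PySem.Str.startswith_eq, PySem.Chars.startswith_iff] at h ⊢
  exact hf.trans h

theorem pvFamilies_any (model : String) :
    pvFamilies.any (fun f => PySem.Str.startswith model f) = PySem.Str.startswith model "claude" := by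
  cases hc : PySem.Str.startswith model "claude" with
  | true =>
    simp only [pvFamilies, List.any_eq_true]
    exact ⟨"claude", by simp, hc⟩
  | false =>
    simp only [pvFamilies, List.any_eq_false]
    intro f hf
    simp only [List.mem_cons, List.not_mem_nil, or_false] at hf
    intro hstart
    rcases hf with h|h|h|h <;> subst h <;>
      exact absurd (pv_prefix_trans _ model (by decide) hstart)
        (by simp_all)

theorem is_valid_model_py_spec : Claim_equal_is_valid_model_py := by
  intro model _
  unfold Spec_is_valid_model_py is_valid_model_py is_valid_model_py_alt
  split_ifs with h1 h2
  · exact (pvSupported_starts model h1).symm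
  · exact ((pvFamilies_any model).symm.trans h2).symm
  · simp only [Bool.not_eq_true] at h2
    exact ((pvFamilies_any model).symm.trans h2).symm
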